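-- pv_equiv track=rewrite | github.com/betoma/advent-2020-python | 06/advent-06.py | anyone
-- ===== SOURCE A (Python) =====
-- def anyone(passengers):
--     groups = []
--     letters = set()
--     for line in passengers:
--         if line == "\n":
--             groups.append(letters)
--             letters = set()
--         else:
--             letters.update(set(line.strip()))
--     groups.append(letters)
--     return groups
-- ===== SOURCE B (Python) =====
-- def anyone(passengers):
--     groups = [[]]
--     for line in passengers:
--         if line == "\n":
--             groups.append([])
--         else:
--             groups[-1].append(line)
--     return [set().union(*(set(l.strip()) for l in group)) for group in groups]
-- ===== Notes on version B (the rewrite author's own statement) =====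
-- stated objective: alternative
-- what changed: Two-pass decomposition: first split the lines into groups of raw lines at '\n' separators, then map each group to the union of its per-line stripped character sets, instead of accumulating one running set interleaved with group emission.
import Mathlib
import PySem

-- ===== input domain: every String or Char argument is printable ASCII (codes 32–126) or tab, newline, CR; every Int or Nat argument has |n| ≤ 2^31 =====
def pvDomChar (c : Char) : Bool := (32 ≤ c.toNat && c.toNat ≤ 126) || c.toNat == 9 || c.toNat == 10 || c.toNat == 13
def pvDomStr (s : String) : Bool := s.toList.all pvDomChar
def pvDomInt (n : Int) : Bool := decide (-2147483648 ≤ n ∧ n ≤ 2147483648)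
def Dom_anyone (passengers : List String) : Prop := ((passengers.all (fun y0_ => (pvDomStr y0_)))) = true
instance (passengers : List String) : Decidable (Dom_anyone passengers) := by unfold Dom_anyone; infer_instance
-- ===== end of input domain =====

-- B is an alternative two-pass decomposition (split into groups of lines, then map each group
-- to the union of its stripped character sets); same cost, no speed claim.

-- ===== PORT A =====
-- set of one-character strings of the stripped line (set(line.strip()))
def pvLineChars (line : String) : List String :=
  (PySem.Str.strip line).toList.map (fun c => String.mk [c])

-- one step of A's loop over (groups, letters)
def pvStepA (st : List (List String) × List String) (line : String) :
    List (List String) × List String :=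
  if line = "\n" then (st.1 ++ [st.2], PySem.Set.empty)
  else (st.1, PySem.Set.update st.2 (PySem.Set.ofList (pvLineChars line)))

def anyone (passengers : List String) : List (List String) :=
  let r := passengers.foldl pvStepA ([], PySem.Set.empty)
  r.1 ++ [r.2]

-- ===== PORT B =====
-- first pass: split the lines into groups at "\n" separators (groups[-1].append(line))
def pvStepB (gs : List (List String)) (line : String) : List (List String) :=
  if line = "\n" then gs ++ [[]]
  else gs.dropLast ++ [gs.getLastD [] ++ [line]]

def pvSplit (passengers : List String) : List (List String) :=
  passengers.foldl pvStepB [[]]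

-- second pass: set().union(*(set(l.strip()) for l in group))
def pvGroupUnion (g : List String) : List String :=
  g.foldl (fun s l => PySem.Set.union s (PySem.Set.ofList (pvLineChars l))) PySem.Set.empty

def anyone_alt (passengers : List String) : List (List String) :=
  (pvSplit passengers).map pvGroupUnion

-- ===== PRECONDITION & SPEC =====
def Spec_anyone (passengers : List String) (out : List (List String)) : Prop := out = anyone_alt passengers
instance (passengers : List String) (out : List (List String)) : Decidable (Spec_anyone passengers out) := by unfold Spec_anyone; infer_instance

-- ===== CLAIM (what is proved, stated in full; the proofs are below) =====
def Claim_equal_anyone : Prop := ∀ (passengers : List String), Dom_anyone passengers → Spec_anyone passengers (anyone passengers)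

-- ===== LEMMAS AND PROOFS =====
-- A's running set over the lines of one group equals B's per-group union
lemma pvGroupUnion_concat (g : List String) (l : String) :
    pvGroupUnion (g ++ [l]) =
      PySem.Set.update (pvGroupUnion g) (PySem.Set.ofList (pvLineChars l)) := by
  simp [pvGroupUnion, List.foldl_append]
  rfl

-- loop invariant: A's state is (map pvGroupUnion of the finished groups, pvGroupUnion of the open group)
lemma pv_main (lines : List String) :
    ∀ (init : List (List String)) (lst : List String),
      (let r := lines.foldl pvStepA (init.map pvGroupUnion, pvGroupUnion lst)
       r.1 ++ [r.2]) = (lines.foldl pvStepB (init ++ [lst])).map pvGroupUnion := by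
  induction lines with
  | nil => intro init lst; simp
  | cons l rest ih =>
      intro init lst
      by_cases h : l = "\n"
      · have h1 : pvStepA (init.map pvGroupUnion, pvGroupUnion lst) l
            = ((init ++ [lst]).map pvGroupUnion, pvGroupUnion []) := by
          simp [pvStepA, h]; rfl
        have h2 : pvStepB (init ++ [lst]) l = (init ++ [lst]) ++ [[]] := by
          simp [pvStepB, h]
        simpa [List.foldl_cons, h1, h2] using ih (init ++ [lst]) []
      · have h1 : pvStepA (init.map pvGroupUnion, pvGroupUnion lst) l
            = (init.map pvGroupUnion, pvGroupUnion (lst ++ [l])) := by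
          simp [pvStepA, h, pvGroupUnion_concat]
        have h2 : pvStepB (init ++ [lst]) l = init ++ [lst ++ [l]] := by
          simp [pvStepB, h]
        simpa [List.foldl_cons, h1, h2] using ih init (lst ++ [l])

-- ===== VERDICT (by name: the statement is the Claim_ definition above) =====
theorem anyone_spec : Claim_equal_anyone := by
  intro passengers _
  show anyone passengers = anyone_alt passengers
  have := pv_main passengers [] []
  simpa [anyone, anyone_alt, pvSplit] using this
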